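-- pv_equiv track=rewrite | github.com/KisloTAooAnkit/Python-Programs | HeapsAndPriorityQ/construct2NumWithMinSum.py | constructNum
-- ===== SOURCE A (Python) =====
-- def constructNum(arr):
--
--     arr.sort()
--
--     num1 = 0
--     num2 = 0
--     flag = True
--     for i in range(len(arr)):
--         val = arr[i]
--         if flag:
--             num1 = 10*num1 + val
--         else:
--             num2 = 10*num2 + val
--         flag = not flag
--
--     return num1 + num2
-- ===== SOURCE B (Python) =====
-- def constructNum(arr):
--     arr.sort()
--     total = 0
--     place = 1
--     it = iter(reversed(arr))
--     for x in it:
--         y = next(it, 0)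
--         total += (x + y) * place
--         place *= 10
--     return total
-- ===== Notes on version B (the rewrite author's own statement) =====
-- stated objective: alternative
-- what changed: Replaces the parity flag and two interleaved base-10 accumulators with a single pass over the reversed sorted digits, consuming two digits at a time that share one running place value and accumulating one weighted sum.
import Mathlib
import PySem

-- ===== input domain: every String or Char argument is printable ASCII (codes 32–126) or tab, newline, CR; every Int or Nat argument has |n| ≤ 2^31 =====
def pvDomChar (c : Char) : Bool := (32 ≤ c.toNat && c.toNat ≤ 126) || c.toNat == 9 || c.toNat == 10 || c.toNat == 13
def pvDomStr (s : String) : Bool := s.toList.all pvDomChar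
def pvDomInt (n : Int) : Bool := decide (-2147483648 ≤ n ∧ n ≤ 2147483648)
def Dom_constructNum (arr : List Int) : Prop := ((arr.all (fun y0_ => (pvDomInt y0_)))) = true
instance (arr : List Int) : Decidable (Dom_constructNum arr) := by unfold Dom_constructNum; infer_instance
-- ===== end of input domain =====

-- B replaces A's parity flag and two interleaved accumulators with one weighted sum (objective: simpler).
-- Both programs sort the argument in place in Python; the equivalence proved here is about the return value.

-- ===== PORT A =====
-- A's loop over range(len(arr)) with state (num1, num2, flag), as a foldl over the sorted list.
def constructNum (arr : List Int) : Int :=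
  let s := PySem.List.sorted arr (fun x => x)
  let st := s.foldl
    (fun (st : Int × Int × Bool) val =>
      if st.2.2 then (10 * st.1 + val, st.2.1, !st.2.2)
      else (st.1, 10 * st.2.1 + val, !st.2.2))
    (0, 0, true)
  st.1 + st.2.1

-- ===== PORT B =====
-- B's for-loop consumes the reversed sorted list two elements at a time (next(it, 0) = 0 past
-- the end), so it is this structural recursion with state (total, place); the final place *= 10
-- after the last pair does not affect the returned total and is dropped.
def pvLoopB : List Int → Int → Int → Int
  | [], total, _ => total
  | [x], total, place => total + (x + 0) * place
  | x :: y :: r, total, place => pvLoopB r (total + (x + y) * place) (place * 10)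

def constructNum_alt (arr : List Int) : Int :=
  pvLoopB (PySem.List.sorted arr (fun x => x)).reverse 0 1

-- ===== PRECONDITION & SPEC =====
def Spec_constructNum (arr : List Int) (out : Int) : Prop := out = constructNum_alt arr
instance (arr : List Int) (out : Int) : Decidable (Spec_constructNum arr out) := by unfold Spec_constructNum; infer_instance

-- ===== CLAIM (what is proved, stated in full; the proofs are below) =====
def Claim_equal_constructNum : Prop := ∀ (arr : List Int), Dom_constructNum arr → Spec_constructNum arr (constructNum arr)

-- ===== LEMMAS AND PROOFS =====

-- A's loop step
def pvStepA (st : Int × Int × Bool) (val : Int) : Int × Int × Bool :=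
  if st.2.2 then (10 * st.1 + val, st.2.1, !st.2.2)
  else (st.1, 10 * st.2.1 + val, !st.2.2)

-- weighted-sum recursion: W (x::l) = x*10^(|l|/2) + W l
def pvW : List Int → Int
  | [] => 0
  | x :: l => x * 10 ^ (l.length / 2) + pvW l

-- exponent for the accumulator that currently holds the flag f
def pvC (f : Bool) (k : Nat) : Nat := if f then (k + 1) / 2 else k / 2

lemma pvLoop_eq (l : List Int) : ∀ (a b : Int) (f : Bool),
    (l.foldl pvStepA (a, b, f)).1 + (l.foldl pvStepA (a, b, f)).2.1
      = a * 10 ^ pvC f l.length + b * 10 ^ pvC (!f) l.length + pvW l := by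
  induction l with
  | nil => intro a b f; cases f <;> simp [pvW, pvC]
  | cons x l ih =>
    intro a b f
    have h2 : (l.length + 1 + 1) / 2 = l.length / 2 + 1 := by omega
    cases f with
    | true =>
      have h : List.foldl pvStepA (a, b, true) (x :: l)
          = List.foldl pvStepA (10 * a + x, b, false) l := by
        simp [List.foldl, pvStepA]
      rw [h, ih]
      simp only [pvW, pvC, List.length_cons, Bool.not_false, Bool.not_true]
      have : ¬ (false = true) := by decide
      simp only [if_neg this, if_pos trivial, h2]
      ring
    | false =>
      have h : List.foldl pvStepA (a, b, false) (x :: l)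
          = List.foldl pvStepA (a, 10 * b + x, true) l := by
        simp [List.foldl, pvStepA]
      rw [h, ih]
      simp only [pvW, pvC, List.length_cons, Bool.not_false, Bool.not_true]
      have : ¬ (false = true) := by decide
      simp only [if_neg this, if_pos trivial, h2]
      ring

-- pvV r: the weighted sum pvLoopB computes over r, as a two-step recursion
def pvV : List Int → Int
  | [] => 0
  | [x] => x
  | x :: y :: r => (x + y) + 10 * pvV r

lemma pvLoopB_eq (r : List Int) : ∀ (t p : Int), pvLoopB r t p = t + p * pvV r := by
  induction r using pvV.induct with
  | case1 => intro t p; simp [pvLoopB, pvV]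
  | case2 x => intro t p; simp [pvLoopB, pvV]; ring
  | case3 x y r ih => intro t p; simp [pvLoopB, pvV, ih]; ring

lemma pvV_snoc (r : List Int) (x : Int) :
    pvV (r ++ [x]) = pvV r + x * 10 ^ (r.length / 2) := by
  induction r using pvV.induct with
  | case1 => simp [pvV]
  | case2 y => simp [pvV]
  | case3 y z r ih =>
    simp only [List.cons_append, pvV, ih, List.length_cons]
    have : (r.length + 1 + 1) / 2 = r.length / 2 + 1 := by omega
    rw [this, pow_succ]
    ring

lemma pvW_eq_pvV_reverse (l : List Int) : pvW l = pvV l.reverse := by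
  induction l with
  | nil => simp [pvW, pvV]
  | cons x l ih =>
    rw [pvW, ih, List.reverse_cons, pvV_snoc, List.length_reverse]
    ring

theorem constructNum_spec : Claim_equal_constructNum := by
  intro arr _
  unfold Spec_constructNum constructNum constructNum_alt
  simp only
  rw [pvLoopB_eq, ← pvW_eq_pvV_reverse]
  have := pvLoop_eq (PySem.List.sorted arr (fun x => x)) 0 0 true
  have hstep : (fun (st : Int × Int × Bool) val =>
      if st.2.2 then (10 * st.1 + val, st.2.1, !st.2.2)
      else (st.1, 10 * st.2.1 + val, !st.2.2)) = pvStepA := rfl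
  rw [hstep, this]
  simp
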